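-- pv_equiv track=rewrite | github.com/john35452/GFG_Weekly_Coding_Contest | gfg-weekly-coding-contest-122/Maximum AND.py | maxAnd
-- ===== SOURCE A (Python) =====
-- def maxAnd(N, A):
--     #code here
--     ans = 0
--     suffix = [0]*(N + 1)
--     suffix[-1] = (1<<32) - 1
--
--     for i in range(N - 1, -1, -1):
--         suffix[i] = suffix[i + 1] & A[i]
--
--     prefix = (1<<32) - 1
--     for i in range(N):
--         ans = max(ans, prefix & suffix[i + 1])
--         prefix &= A[i]
--     return ans
-- ===== SOURCE B (Python) =====
-- def maxAnd(N, A):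
--     # Brute force: for each excluded index, recompute the AND of all other
--     # elements directly (O(N^2)) instead of prefix/suffix AND tables.
--     mask = (1 << 32) - 1
--     best = 0
--     for i in range(N):
--         cur = mask
--         for j in range(N):
--             if j != i:
--                 cur &= A[j]
--         best = max(best, cur)
--     return best
-- ===== Notes on version B (the rewrite author's own statement) =====
-- stated objective: alternative
-- what changed: Replaces A's prefix/suffix AND tables with a direct double loop that recomputes the AND of all other elements for each excluded index.
import Mathlib
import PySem

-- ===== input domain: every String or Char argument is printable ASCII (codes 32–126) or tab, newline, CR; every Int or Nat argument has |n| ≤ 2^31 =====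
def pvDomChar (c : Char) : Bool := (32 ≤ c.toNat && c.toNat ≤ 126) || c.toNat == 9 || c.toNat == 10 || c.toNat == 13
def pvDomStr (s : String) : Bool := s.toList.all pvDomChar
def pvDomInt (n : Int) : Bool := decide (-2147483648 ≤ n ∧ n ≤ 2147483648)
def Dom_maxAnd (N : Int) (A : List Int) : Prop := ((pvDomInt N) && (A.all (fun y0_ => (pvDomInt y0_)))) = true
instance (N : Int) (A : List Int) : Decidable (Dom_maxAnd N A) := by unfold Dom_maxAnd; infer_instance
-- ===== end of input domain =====

-- B replaces A's prefix/suffix AND tables with a direct O(N^2) double loop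
-- (re-AND all other elements for each excluded index); objective: alternative
-- (structurally different, not faster).

-- ===== PORT A =====
def maxAnd (N : Int) (A : List Int) : Int :=
  let ans : Int := 0
  let suffix : List Int := List.replicate (N + 1).toNat 0
  let suffix := PySem.List.pySetD suffix (-1) (((1 : Int) <<< (32 : Nat)) - 1)
  let suffix := (PySem.List.pyRange (N - 1) (-1) (-1)).foldl
    (fun suf i =>
      PySem.List.pySetD suf i
        (PySem.Int.band (PySem.List.pyGetD suf (i + 1) 0) (PySem.List.pyGetD A i 0)))
    suffix
  let st := (PySem.List.pyRange 0 N 1).foldl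
    (fun (st : Int × Int) i =>
      (max st.1 (PySem.Int.band st.2 (PySem.List.pyGetD suffix (i + 1) 0)),
       PySem.Int.band st.2 (PySem.List.pyGetD A i 0)))
    (ans, ((1 : Int) <<< (32 : Nat)) - 1)
  st.1

-- ===== PORT B =====
def maxAnd_alt (N : Int) (A : List Int) : Int :=
  let mask : Int := ((1 : Int) <<< (32 : Nat)) - 1
  (PySem.List.pyRange 0 N 1).foldl
    (fun best i =>
      let cur := (PySem.List.pyRange 0 N 1).foldl
        (fun cur j =>
          if j ≠ i then PySem.Int.band cur (PySem.List.pyGetD A j 0) else cur)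
        mask
      max best cur)
    0

-- ===== PRECONDITION & SPEC =====
-- Python A raises IndexError when N < 0 (suffix[-1] on an empty list) or when
-- N > len(A) (A[i] out of range); Pre_ excludes exactly those inputs.
def Pre_maxAnd (N : Int) (A : List Int) : Prop := 0 ≤ N ∧ N ≤ A.length
instance (N : Int) (A : List Int) : Decidable (Pre_maxAnd N A) := by unfold Pre_maxAnd; infer_instance

def pvWitness_maxAnd : Int × List Int := (3, [12, 10, 6])

def Spec_maxAnd (N : Int) (A : List Int) (out : Int) : Prop := out = maxAnd_alt N A
instance (N : Int) (A : List Int) (out : Int) : Decidable (Spec_maxAnd N A out) := by unfold Spec_maxAnd; infer_instance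

-- ===== CLAIM (what is proved, stated in full; the proofs are below) =====
def Claim_equal_maxAnd : Prop := ∀ (N : Int) (A : List Int), Dom_maxAnd N A → Pre_maxAnd N A → Spec_maxAnd N A (maxAnd N A)

-- ===== LEMMAS AND PROOFS =====

-- associativity of Python's & on Int (via Mathlib's Int.land and testBit)
theorem pv_int_ext {a b : Int} (h : ∀ k, a.testBit k = b.testBit k) : a = b := by
  cases a with
  | ofNat m =>
    cases b with
    | ofNat n =>
      exact congrArg Int.ofNat (Nat.eq_of_testBit_eq fun i => by simpa [Int.testBit] using h i)
    | negSucc n =>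
      have hk := h (m + n)
      have h1 : m < 2 ^ (m + n) :=
        lt_of_le_of_lt (Nat.le_add_right m n) Nat.lt_two_pow_self
      have h2 : n < 2 ^ (m + n) :=
        lt_of_le_of_lt (Nat.le_add_left n m) Nat.lt_two_pow_self
      simp [Int.testBit, Nat.testBit_lt_two_pow h1, Nat.testBit_lt_two_pow h2] at hk
  | negSucc m =>
    cases b with
    | ofNat n =>
      have hk := h (m + n)
      have h1 : m < 2 ^ (m + n) :=
        lt_of_le_of_lt (Nat.le_add_right m n) Nat.lt_two_pow_self
      have h2 : n < 2 ^ (m + n) :=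
        lt_of_le_of_lt (Nat.le_add_left n m) Nat.lt_two_pow_self
      simp [Int.testBit, Nat.testBit_lt_two_pow h1, Nat.testBit_lt_two_pow h2] at hk
    | negSucc n =>
      exact congrArg Int.negSucc (Nat.eq_of_testBit_eq fun i => by simpa [Int.testBit] using h i)

theorem pv_zero_ldiff (n : Nat) : Nat.ldiff 0 n = 0 :=
  Nat.eq_of_testBit_eq fun i => by simp [Nat.testBit_ldiff]

theorem pv_ldiff_zero (m : Nat) : Nat.ldiff m 0 = m :=
  Nat.eq_of_testBit_eq fun i => by simp [Nat.testBit_ldiff]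

theorem pv_and_add_ldiff (m : Nat) : ∀ n : Nat, (m &&& n) + m.ldiff n = m := by
  induction m using Nat.binaryRec with
  | zero => intro n; simp [Nat.zero_and, pv_zero_ldiff]
  | bit a q ih =>
    intro n
    induction n using Nat.binaryRec with
    | zero => simp [Nat.and_zero, pv_ldiff_zero]
    | bit b s _ =>
      rw [Nat.land_bit, Nat.ldiff_bit, Nat.bit_val, Nat.bit_val, Nat.bit_val]
      have := ih s
      cases a <;> cases b <;> simp [Bool.toNat] <;> omega

theorem pv_sub_and (m n : Nat) : m - (m &&& n) = m.ldiff n := by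
  have h := pv_and_add_ldiff m n
  omega

theorem pv_band_eq_land (a b : Int) : PySem.Int.band a b = Int.land a b := by
  cases a with
  | ofNat m =>
    cases b with
    | ofNat n =>
      simp [PySem.Int.band, Int.land]
    | negSucc n =>
      have h1 : (0 : Int) ≤ Int.ofNat m := Int.ofNat_nonneg m
      have h2 : ¬ (0 : Int) ≤ Int.negSucc n := by
        rw [Int.negSucc_eq]; omega
      have h3 : -Int.negSucc n - 1 = (n : Int) := by
        rw [Int.negSucc_eq]; ring
      simp [PySem.Int.band, Int.land, h2, h3, pv_sub_and]
  | negSucc m =>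
    cases b with
    | ofNat n =>
      have h1 : ¬ (0 : Int) ≤ Int.negSucc m := by
        rw [Int.negSucc_eq]; omega
      have h2 : (0 : Int) ≤ Int.ofNat n := Int.ofNat_nonneg n
      have h3 : -Int.negSucc m - 1 = (m : Int) := by
        rw [Int.negSucc_eq]; ring
      simp [PySem.Int.band, Int.land, h1, h3, pv_sub_and]
    | negSucc n =>
      have h1 : ¬ (0 : Int) ≤ Int.negSucc m := by
        rw [Int.negSucc_eq]; omega
      have h2 : ¬ (0 : Int) ≤ Int.negSucc n := by
        rw [Int.negSucc_eq]; omega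
      have h3 : -Int.negSucc m - 1 = (m : Int) := by
        rw [Int.negSucc_eq]; ring
      have h4 : -Int.negSucc n - 1 = (n : Int) := by
        rw [Int.negSucc_eq]; ring
      have hm : ¬((m : Int) ≤ -1) := by omega
      have hn' : ¬((n : Int) ≤ -1) := by omega
      simp [PySem.Int.band, Int.land, h1, h2, Int.negSucc_eq, hm, hn']
      omega

theorem pv_band_assoc (a b c : Int) :
    PySem.Int.band (PySem.Int.band a b) c = PySem.Int.band a (PySem.Int.band b c) := by
  apply pv_int_ext
  intro k
  simp [pv_band_eq_land, Int.testBit_land, Bool.and_assoc]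

-- the 32-bit mask and the suffix-AND value, used to describe both programs
def pvMask : Int := ((1 : Int) <<< (32 : Nat)) - 1

def pvSfx (xs : List Int) : Int := xs.foldr (fun x acc => PySem.Int.band acc x) pvMask

-- state of A's suffix table after it has been filled from index i upward
def pvTab (L : List Int) (i : Nat) : List Int :=
  List.replicate i 0 ++ (List.range (L.length + 1 - i)).map (fun k => pvSfx (L.drop (i + k)))

theorem pv_band_foldl_absorb (xs : List Int) :
    ∀ a m : Int, PySem.Int.band a m = a →
      PySem.Int.band (xs.foldl PySem.Int.band a) m = xs.foldl PySem.Int.band a := by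
  induction xs with
  | nil => intro a m h; exact h
  | cons x xs ih =>
    intro a m h
    simp only [List.foldl_cons]
    refine ih _ m ?_
    rw [pv_band_assoc, PySem.Int.band_comm x m, ← pv_band_assoc, h]

theorem pv_band_sfx (ys : List Int) :
    ∀ p : Int, PySem.Int.band p pvMask = p →
      PySem.Int.band p (pvSfx ys) = ys.foldl PySem.Int.band p := by
  induction ys with
  | nil => intro p h; exact h
  | cons y ys ih =>
    intro p h
    have hstep : pvSfx (y :: ys) = PySem.Int.band (pvSfx ys) y := rfl
    rw [hstep, List.foldl_cons]
    have h' : PySem.Int.band (PySem.Int.band p y) pvMask = PySem.Int.band p y := by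
      rw [pv_band_assoc, PySem.Int.band_comm y pvMask, ← pv_band_assoc, h]
    rw [← ih (PySem.Int.band p y) h']
    rw [← pv_band_assoc, pv_band_assoc p y (pvSfx ys),
        PySem.Int.band_comm y (pvSfx ys), ← pv_band_assoc]

theorem pv_pfx_absorb (xs : List Int) :
    PySem.Int.band (xs.foldl PySem.Int.band pvMask) pvMask = xs.foldl PySem.Int.band pvMask :=
  pv_band_foldl_absorb xs pvMask pvMask (PySem.Int.band_self pvMask)

-- a fold over range(a, a+m) reading A[j] is a fold over the segment of A
theorem pv_fold_seg (A : List Int) (f : Int → Int → Int) :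
    ∀ (m : Nat) (a init : Int), 0 ≤ a → a.toNat + m ≤ A.length →
      (PySem.List.pyRange a (a + (m : Int)) 1).foldl
          (fun c j => f c (PySem.List.pyGetD A j 0)) init
        = ((A.drop a.toNat).take m).foldl f init := by
  intro m
  induction m with
  | zero =>
    intro a init _ _
    simp [PySem.List.pyRange_one_eq_nil (le_refl a)]
  | succ m ih =>
    intro a init ha hlen
    have hlt : a < a + ((m + 1 : Nat) : Int) := by push_cast; omega
    rw [PySem.List.pyRange_one_cons hlt]
    have hidx : a < (A.length : Int) := by omega
    have hA : PySem.List.pyGetD A a 0 = A[a.toNat]'(by omega) :=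
      PySem.List.pyGetD_eq_getElem A 0 ha hidx
    have hdrop : A.drop a.toNat = A[a.toNat]'(by omega) :: A.drop (a.toNat + 1) :=
      List.drop_eq_getElem_cons (by omega)
    have hrange : a + ((m + 1 : Nat) : Int) = (a + 1) + (m : Int) := by push_cast; ring
    rw [hrange]
    simp only [List.foldl_cons, hA]
    rw [ih (a + 1) (f init (A[a.toNat]'(by omega))) (by omega)
        (by have : (a + 1).toNat = a.toNat + 1 := by omega
            rw [this]; omega)]
    have htn : (a + 1).toNat = a.toNat + 1 := by omega
    rw [htn, hdrop, List.take_succ_cons, List.foldl_cons]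

-- reading entry j of the finished suffix table
theorem pv_tab_get (L : List Int) (j : Nat) (hj : j ≤ L.length) :
    PySem.List.pyGetD (pvTab L 0) ((j : Int)) 0 = pvSfx (L.drop j) := by
  rw [PySem.List.pyGetD_natCast]
  unfold pvTab
  simp only [List.replicate_zero, List.nil_append, Nat.zero_add, Nat.sub_zero]
  rw [List.getD_eq_getElem _ _ (by simp [Nat.lt_succ_of_le hj])]
  simp

-- one downward step of A's suffix loop turns table state i+1 into state i
theorem pv_tab_step (A : List Int) (n : Nat) (hn : n ≤ A.length) (i : Nat) (hi : i < n) :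
    PySem.List.pySetD (pvTab (A.take n) (i + 1)) ((i : Int))
      (PySem.Int.band
        (PySem.List.pyGetD (pvTab (A.take n) (i + 1)) ((i : Int) + 1) 0)
        (PySem.List.pyGetD A ((i : Int)) 0))
    = pvTab (A.take n) i := by
  have hL : (A.take n).length = n := by simp [Nat.min_eq_left hn]
  have hiA : i < A.length := lt_of_lt_of_le hi hn
  -- the table entry read at i+1
  have hget : PySem.List.pyGetD (pvTab (A.take n) (i + 1)) ((i : Int) + 1) 0
      = pvSfx ((A.take n).drop (i + 1)) := by
    have hcast : ((i : Int) + 1) = ((i + 1 : Nat) : Int) := by push_cast; ring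
    rw [hcast, PySem.List.pyGetD_natCast]
    unfold pvTab
    rw [List.getD_eq_getElem _ _ (by simp [hL]; omega)]
    rw [List.getElem_append_right (by simp)]
    simp [hL]
  -- the array element read at i
  have hAi : PySem.List.pyGetD A ((i : Int)) 0 = A[i] := by
    rw [PySem.List.pyGetD_natCast, List.getD_eq_getElem _ _ hiA]
  -- the written value is the suffix-AND from i
  have hval : PySem.Int.band (pvSfx ((A.take n).drop (i + 1))) A[i]
      = pvSfx ((A.take n).drop i) := by
    have hdrop : (A.take n).drop i
        = (A.take n)[i]'(by omega) :: (A.take n).drop (i + 1) :=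
      List.drop_eq_getElem_cons (by omega)
    have hgetTake : (A.take n)[i]'(by omega) = A[i] := by
      simp
    rw [hdrop, hgetTake]
    rfl
  rw [hget, hAi, hval]
  rw [PySem.List.pySetD_natCast]
  -- now a plain List.set computation on the table
  unfold pvTab
  rw [List.set_append]
  simp only [List.length_replicate, if_pos (Nat.lt_succ_self i)]
  rw [List.replicate_succ', List.set_append]
  simp only [List.length_replicate, lt_irrefl, Nat.sub_self]
  have hrange : List.range ((A.take n).length + 1 - i)
      = 0 :: (List.range ((A.take n).length + 1 - (i + 1))).map Nat.succ := by
    rw [hL]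
    have h1 : n + 1 - i = (n - i) + 1 := by omega
    have h2 : n + 1 - (i + 1) = n - i := by omega
    rw [h1, h2, List.range_succ_eq_map]
  rw [hrange]
  simp [Function.comp_def]
  intro a _
  congr 2
  omega

-- running A's whole suffix loop from the freshly initialised table
theorem pv_suffix_build (A : List Int) (n : Nat) (hn : n ≤ A.length) :
    ∀ i : Nat, i ≤ n →
      (PySem.List.pyRange ((i : Int) - 1) (-1) (-1)).foldl
        (fun suf j =>
          PySem.List.pySetD suf j
            (PySem.Int.band (PySem.List.pyGetD suf (j + 1) 0) (PySem.List.pyGetD A j 0)))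
        (pvTab (A.take n) i)
      = pvTab (A.take n) 0 := by
  intro i
  induction i with
  | zero =>
    intro _
    rw [PySem.List.pyRange_neg_one_eq_nil (by omega)]
    rfl
  | succ i ih =>
    intro hi
    have hcast : ((i + 1 : Nat) : Int) - 1 = (i : Int) := by push_cast; ring
    rw [hcast, PySem.List.pyRange_neg_one_cons (by omega)]
    simp only [List.foldl_cons]
    rw [pv_tab_step A n hn i (by omega)]
    exact ih (by omega)

-- the initial table (all zeros, last cell = mask) is state n
theorem pv_init_tab (A : List Int) (n : Nat) (hn : n ≤ A.length) :
    PySem.List.pySetD (List.replicate (((n : Int) + 1)).toNat 0) (-1) pvMask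
      = pvTab (A.take n) n := by
  have hL : (A.take n).length = n := by simp [Nat.min_eq_left hn]
  have htn : (((n : Int) + 1)).toNat = n + 1 := by omega
  rw [htn]
  have hlen : (List.replicate (n + 1) (0 : Int)).length = n + 1 := by simp
  unfold PySem.List.pySetD PySem.List.pySet? PySem.List.pyIdx?
  rw [hlen]
  norm_num
  unfold pvTab
  rw [hL]
  have h1 : n + 1 - n = 1 := by omega
  rw [h1]
  have h2 : (A.take n).drop n = [] := by
    rw [List.drop_eq_nil_iff]
    omega
  simp [List.range_one, h2, List.replicate_succ']
  rfl

-- candidate value considered by both programs at excluded index k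
def pvCand (L : List Int) (k : Nat) : Int :=
  PySem.Int.band ((L.take k).foldl PySem.Int.band pvMask) (pvSfx (L.drop (k + 1)))

-- A's main loop computes the running max of pvCand over 0..n-1
theorem pv_loopA (A : List Int) (N : Int) (n : Nat) (hN : N = (n : Int)) (hn : n ≤ A.length) :
    ∀ (m i : Nat) (b : Int), i + m = n →
      ((PySem.List.pyRange ((i : Int)) N 1).foldl
        (fun (st : Int × Int) j =>
          (max st.1 (PySem.Int.band st.2 (PySem.List.pyGetD (pvTab (A.take n) 0) (j + 1) 0)),
           PySem.Int.band st.2 (PySem.List.pyGetD A j 0)))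
        (b, ((A.take n).take i).foldl PySem.Int.band pvMask)).1
      = (List.range m).foldl (fun a k => max a (pvCand (A.take n) (i + k))) b := by
  intro m
  induction m with
  | zero =>
    intro i b hin
    rw [hN, PySem.List.pyRange_one_eq_nil (by omega)]
    rfl
  | succ m ih =>
    intro i b hin
    have hL : (A.take n).length = n := by simp [Nat.min_eq_left hn]
    have hi : i < n := by omega
    have hlt : ((i : Int)) < N := by omega
    rw [PySem.List.pyRange_one_cons hlt]
    simp only [List.foldl_cons]
    have hcast : ((i : Int)) + 1 = ((i + 1 : Nat) : Int) := by push_cast; ring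
    have hT : PySem.List.pyGetD (pvTab (A.take n) 0) ((i : Int) + 1) 0
        = pvSfx ((A.take n).drop (i + 1)) := by
      rw [hcast, pv_tab_get _ _ (by omega)]
    have hAi : PySem.List.pyGetD A ((i : Int)) 0 = A[i]'(by omega) := by
      rw [PySem.List.pyGetD_natCast, List.getD_eq_getElem _ _ (by omega)]
    have hpfx : PySem.Int.band (((A.take n).take i).foldl PySem.Int.band pvMask) (A[i]'(by omega))
        = ((A.take n).take (i + 1)).foldl PySem.Int.band pvMask := by
      have htake : (A.take n).take (i + 1) = (A.take n).take i ++ [(A.take n)[i]'(by omega)] := by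
        rw [List.take_add_one]
        simp [List.getElem?_eq_getElem (by omega : i < (A.take n).length)]
      have hel : (A.take n)[i]'(by omega) = A[i]'(by omega) := by simp
      rw [htake, List.foldl_append, hel]
      rfl
    rw [hT, hAi, hpfx]
    have hfirst : max b (PySem.Int.band (((A.take n).take i).foldl PySem.Int.band pvMask)
        (pvSfx ((A.take n).drop (i + 1)))) = max b (pvCand (A.take n) i) := rfl
    rw [hfirst]
    have := ih (i + 1) (max b (pvCand (A.take n) i)) (by omega)
    rw [hcast]
    rw [this]
    rw [List.range_succ_eq_map, List.foldl_cons, List.foldl_map]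
    have harg : (fun (a : Int) (k : Nat) => max a (pvCand (A.take n) (i + 1 + k)))
        = fun (a : Int) (k : Nat) => max a (pvCand (A.take n) (i + Nat.succ k)) := by
      funext a k
      congr 2
      omega
    rw [harg]
    simp

-- B's inner loop at excluded index k equals pvCand k
theorem pv_inner (A : List Int) (N : Int) (n : Nat) (hN : N = (n : Int)) (hn : n ≤ A.length)
    (k : Nat) (hk : k < n) :
    (PySem.List.pyRange 0 N 1).foldl
      (fun cur j =>
        if j ≠ ((k : Int)) then PySem.Int.band cur (PySem.List.pyGetD A j 0) else cur)
      pvMask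
    = pvCand (A.take n) k := by
  have hsplit : PySem.List.pyRange 0 N 1
      = PySem.List.pyRange 0 ((k : Int)) 1 ++ PySem.List.pyRange ((k : Int)) N 1 :=
    PySem.List.pyRange_one_append 0 ((k : Int)) N (by omega) (by omega)
  rw [hsplit, List.foldl_append]
  rw [PySem.List.pyRange_one_cons (by omega : ((k : Int)) < N)]
  -- drop the guard on [0, k): every j there is ≠ k
  rw [PySem.List.foldl_congr_mem (PySem.List.pyRange 0 ((k : Int)) 1)
      (fun cur j => if j ≠ ((k : Int)) then PySem.Int.band cur (PySem.List.pyGetD A j 0) else cur)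
      (fun cur j => PySem.Int.band cur (PySem.List.pyGetD A j 0)) pvMask
      (by
        intro acc x hx
        have := PySem.List.mem_pyRange_one.1 hx
        have hne : x ≠ ((k : Int)) := by omega
        simp [hne])]
  have hfirst := pv_fold_seg A PySem.Int.band k 0 pvMask (le_refl 0) (by simpa using le_trans (le_of_lt hk) hn)
  simp only [Int.toNat_zero, List.drop_zero, zero_add] at hfirst
  rw [hfirst]
  have hpfxeq : (A.take k).foldl PySem.Int.band pvMask
      = ((A.take n).take k).foldl PySem.Int.band pvMask := by
    rw [List.take_take, Nat.min_eq_left (le_of_lt hk)]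
  rw [hpfxeq]
  simp only [List.foldl_cons, ne_eq, not_true_eq_false, if_false]
  -- drop the guard on (k, N): every j there is ≠ k
  rw [PySem.List.foldl_congr_mem (PySem.List.pyRange ((k : Int) + 1) N 1)
      (fun cur j => if j ≠ ((k : Int)) then PySem.Int.band cur (PySem.List.pyGetD A j 0) else cur)
      (fun cur j => PySem.Int.band cur (PySem.List.pyGetD A j 0)) _
      (by
        intro acc x hx
        have := PySem.List.mem_pyRange_one.1 hx
        have hne : x ≠ ((k : Int)) := by omega
        simp [hne])]
  have hcast : ((k : Int)) + 1 = ((k + 1 : Nat) : Int) := by push_cast; ring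
  have hcast2 : N = ((k + 1 : Nat) : Int) + ((n - (k + 1) : Nat) : Int) := by push_cast; omega
  rw [hcast, hcast2]
  have hsecond := pv_fold_seg A PySem.Int.band (n - (k + 1)) ((k + 1 : Nat) : Int)
      (((A.take n).take k).foldl PySem.Int.band pvMask) (by omega)
      (by rw [Int.toNat_natCast]; omega)
  rw [hsecond]
  have hdrop : (A.drop ((((k + 1 : Nat)) : Int)).toNat).take (n - (k + 1))
      = (A.take n).drop (k + 1) := by
    rw [Int.toNat_natCast, List.drop_take]
  rw [hdrop]
  unfold pvCand
  rw [pv_band_sfx ((A.take n).drop (k + 1)) _ (pv_pfx_absorb ((A.take n).take k))]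

-- ===== VERDICT (by name: the statement is the Claim_ definition above) =====
theorem maxAnd_spec : Claim_equal_maxAnd := by
  intro N A _ hPre
  obtain ⟨hN0, hNlen⟩ := hPre
  unfold Spec_maxAnd
  simp only [maxAnd, maxAnd_alt]
  set n : Nat := N.toNat with hn
  have hN : N = (n : Int) := by omega
  have hnlen : n ≤ A.length := by omega
  -- A's side: initial table, suffix loop, main loop
  have hinit : PySem.List.pySetD (List.replicate (N + 1).toNat 0) (-1)
        (((1 : Int) <<< (32 : Nat)) - 1)
      = pvTab (A.take n) n := by
    rw [hN]
    exact pv_init_tab A n hnlen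
  have hsuf : (PySem.List.pyRange (N - 1) (-1) (-1)).foldl
      (fun suf i =>
        PySem.List.pySetD suf i
          (PySem.Int.band (PySem.List.pyGetD suf (i + 1) 0) (PySem.List.pyGetD A i 0)))
      (pvTab (A.take n) n)
      = pvTab (A.take n) 0 := by
    have := pv_suffix_build A n hnlen n (le_refl n)
    rw [hN]
    exact this
  rw [hinit, hsuf]
  have hmask : ((1 : Int) <<< (32 : Nat)) - 1 = pvMask := rfl
  rw [hmask]
  have hA := pv_loopA A N n hN hnlen n 0 0 (by omega)
  simp only [Nat.cast_zero, List.take_zero, List.foldl_nil, Nat.zero_add] at hA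
  rw [hA]
  -- B's side: replace each inner loop by pvCand, then map the outer range
  rw [PySem.List.foldl_congr_mem (PySem.List.pyRange 0 N 1)
      (fun (best : Int) (i : Int) =>
        max best ((PySem.List.pyRange 0 N 1).foldl
          (fun cur j => if j ≠ i then PySem.Int.band cur (PySem.List.pyGetD A j 0) else cur)
          pvMask))
      (fun (best : Int) (i : Int) => max best (pvCand (A.take n) i.toNat))
      0
      (by
        intro acc x hx
        have hb := PySem.List.mem_pyRange_one.1 hx
        obtain ⟨k, rfl⟩ : ∃ k : Nat, x = (k : Int) := ⟨x.toNat, by omega⟩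
        have hkn : k < n := by omega
        simp only []
        rw [pv_inner A N n hN hnlen k hkn]
        simp)]
  rw [PySem.List.pyRange_one 0 N]
  have hNn : (N - 0).toNat = n := by omega
  rw [hNn, List.foldl_map]
  congr 1
  funext a k
  simp
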